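-- pv_equiv track=rewrite | github.com/tezc4t/AlgoPY1 | Algo-Python-full/12-Matrice/coordonnees_minimum.py | coordonnees_minimum
-- ===== SOURCE A (Python) =====
-- def coordonnees_minimum(matrice):
--     """
--     Trouve les coordonnées du minimum dans une matrice 2D.
--
--     Args:
--         matrice: Liste de listes représentant une matrice 2D
--
--     Returns:
--         Tuple (ligne, colonne) des coordonnées du minimum
--
--     Complexité:
--         - Au pire: O(n × m) - parcours complet
--         - Au meilleur: O(1) - minimum en [0][0]
--     """
--     if not matrice or not matrice[0]:
--         return None
--
--     min_val = matrice[0][0]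
--     min_ligne = 0
--     min_colonne = 0
--
--     for i in range(len(matrice)):
--         for j in range(len(matrice[i])):
--             if matrice[i][j] < min_val:
--                 min_val = matrice[i][j]
--                 min_ligne = i
--                 min_colonne = j
--
--     return (min_ligne, min_colonne)
-- ===== SOURCE B (Python) =====
-- def coordonnees_minimum(matrice):
--     if not matrice or not matrice[0]:
--         return None
--     # stage 1: per-row table of (row_min_value, row_index, first_min_column)
--     table = []
--     for i, ligne in enumerate(matrice):
--         if ligne:
--             v, j = ligne[0], 0
--             for k, x in enumerate(ligne[1:], 1):
--                 if x < v:
--                     v, j = x, k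
--             table.append((v, i, j))
--     # stage 2: pick the row entry with the smallest value (earliest wins)
--     best = table[0]
--     for entry in table[1:]:
--         if entry[0] < best[0]:
--             best = entry
--     return (best[1], best[2])
-- ===== Notes on version B (the rewrite author's own statement) =====
-- stated objective: alternative
-- what changed: A's single fused double loop tracking a global (min_val, row, col) is replaced by a two-stage decomposition: one pass builds a per-row table of (row minimum, row index, first minimal column), a second pass picks the table entry with the smallest value (earliest row wins).
import Mathlib
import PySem

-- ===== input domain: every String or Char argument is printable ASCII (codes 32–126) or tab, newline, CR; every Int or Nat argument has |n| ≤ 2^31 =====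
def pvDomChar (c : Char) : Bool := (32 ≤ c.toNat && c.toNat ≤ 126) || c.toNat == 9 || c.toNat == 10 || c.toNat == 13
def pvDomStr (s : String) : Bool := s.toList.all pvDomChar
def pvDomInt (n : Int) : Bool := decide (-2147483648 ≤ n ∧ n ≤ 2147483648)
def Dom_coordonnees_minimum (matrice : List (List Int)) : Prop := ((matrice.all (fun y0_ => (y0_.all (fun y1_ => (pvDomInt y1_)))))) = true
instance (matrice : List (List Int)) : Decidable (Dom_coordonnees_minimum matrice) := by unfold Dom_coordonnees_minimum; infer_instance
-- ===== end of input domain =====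

-- B replaces A's fused double scan by a two-stage decomposition (per-row minima table, then
-- best row); same coordinates, same cost (objective: alternative decomposition).

-- ===== PORT A =====
-- literal transliteration of A: guard, then nested index loops over range(len(...)),
-- updating (min_val, min_ligne, min_colonne) on strict '<'
def coordonnees_minimum (matrice : List (List Int)) : Option (Int × Int) :=
  match matrice with
  | [] => none
  | r0 :: _ =>
    match r0 with
    | [] => none
    | x0 :: _ =>
      let st := (List.range matrice.length).foldl (fun st i =>
        let ligne := matrice.getD i []
        (List.range ligne.length).foldl (fun st j =>
          if ligne.getD j 0 < st.1 then (ligne.getD j 0, ((i : Int), (j : Int))) else st) st)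
        (x0, ((0 : Int), (0 : Int)))
      some st.2

-- ===== PORT B =====
-- Source B's inner row loop: v, j = ligne[0], 0; for k, x in enumerate(ligne[1:], 1): …
def pvRowMin (x : Int) (t : List Int) : Int × Nat :=
  (t.zipIdx 1).foldl (fun vj p => if p.1 < vj.1 then p else vj) (x, 0)

def coordonnees_minimum_alt (matrice : List (List Int)) : Option (Int × Int) :=
  match matrice with
  | [] => none
  | r0 :: _ =>
    match r0 with
    | [] => none
    | _ :: _ =>
      -- stage 1: table of (row_min_value, row_index, first_min_column) for nonempty rows
      let table := matrice.zipIdx.foldl (fun tbl p =>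
        match p.1 with
        | [] => tbl
        | x :: t =>
          let r := pvRowMin x t
          tbl ++ [(r.1, ((p.2 : Int), (r.2 : Int)))]) []
      -- stage 2: best = table[0]; scan table[1:]  ([] branch is unreachable: row 0 is nonempty)
      match table with
      | [] => none
      | b0 :: rest =>
        let best := rest.foldl (fun b e => if e.1 < b.1 then e else b) b0
        some best.2

-- ===== PRECONDITION & SPEC =====
def Spec_coordonnees_minimum (matrice : List (List Int)) (out : Option (Int × Int)) : Prop := out = coordonnees_minimum_alt matrice
instance (matrice : List (List Int)) (out : Option (Int × Int)) : Decidable (Spec_coordonnees_minimum matrice out) := by unfold Spec_coordonnees_minimum; infer_instance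

-- ===== CLAIM (what is proved, stated in full; the proofs are below) =====
def Claim_equal_coordonnees_minimum : Prop := ∀ (matrice : List (List Int)), Dom_coordonnees_minimum matrice → Spec_coordonnees_minimum matrice (coordonnees_minimum matrice)

-- ===== LEMMAS AND PROOFS =====

-- the 'pick the smaller, earlier wins' combinator both sides reduce to
def pvMin2 (b e : Int × Int × Int) : Int × Int × Int := if e.1 < b.1 then e else b
def pvLift (i : Nat) (vj : Int × Nat) : Int × Int × Int := (vj.1, ((i : Int), (vj.2 : Int)))

-- per-row table as a plain recursive function
def pvTbl : List (List Int) → Nat → List (Int × Int × Int)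
  | [], _ => []
  | [] :: rs, k => pvTbl rs (k + 1)
  | (x :: t) :: rs, k => pvLift k (pvRowMin x t) :: pvTbl rs (k + 1)

-- bridge: a foldl over range(len xs) reading xs.getD equals a foldl over xs.zipIdx
theorem pv_range_foldl {α β : Type} (f : β → α → Nat → β) (d : α) :
    ∀ (xs : List α) (k : Nat) (a : β),
    (List.range xs.length).foldl (fun st j => f st (xs.getD j d) (j + k)) a
      = (xs.zipIdx k).foldl (fun st p => f st p.1 p.2) a := by
  intro xs
  induction xs with
  | nil => intro k a; simp
  | cons x t ih =>
    intro k a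
    simp only [List.length_cons, List.range_succ_eq_map, List.foldl_cons, List.foldl_map,
      List.getD_cons_zero, List.getD_cons_succ, List.zipIdx_cons, Nat.zero_add]
    have h := ih (k + 1) (f a x k)
    have he : (fun (st : β) (j : Nat) => f st (t.getD j d) (j + 1 + k))
        = (fun st j => f st (t.getD j d) (j + (k + 1))) := by
      funext st j; rw [Nat.add_assoc, Nat.add_comm 1 k]
    rw [← h, he]

theorem pv_range_foldl0 {α β : Type} (f : β → α → Nat → β) (d : α) (xs : List α) (a : β) :
    (List.range xs.length).foldl (fun st j => f st (xs.getD j d) j) a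
      = xs.zipIdx.foldl (fun st p => f st p.1 p.2) a :=
  pv_range_foldl f d xs 0 a

-- the strict-'<' fold keeps its seed or strictly improves on it
theorem pv_rowfold_cases :
    ∀ (l : List (Int × Nat)) (v : Int) (j : Nat),
    l.foldl (fun vj p => if p.1 < vj.1 then p else vj) (v, j) = (v, j)
      ∨ (l.foldl (fun vj p => if p.1 < vj.1 then p else vj) (v, j)).1 < v := by
  intro l
  induction l with
  | nil => intro v j; left; rfl
  | cons q t ih =>
    intro v j
    by_cases h : q.1 < v
    · simp only [List.foldl_cons, if_pos h]
      rcases ih q.1 q.2 with h1 | h1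
      · right; rw [h1]; exact h
      · right; exact lt_trans h1 h
    · simpa [List.foldl_cons, if_neg h] using ih v j

-- A's inner row scan from seed st = pvMin2 of st with the row's (min value, first column)
theorem pv_row (i : Nat) :
    ∀ (l : List (Int × Nat)) (st : Int × Int × Int) (v : Int) (j : Nat),
    l.foldl (fun st q => if q.1 < st.1 then (q.1, ((i : Int), (q.2 : Int))) else st)
        (if v < st.1 then (v, ((i : Int), (j : Int))) else st)
      = pvMin2 st (pvLift i (l.foldl (fun vj p => if p.1 < vj.1 then p else vj) (v, j))) := by
  intro l
  induction l with
  | nil => intro st v j; simp [pvMin2, pvLift]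
  | cons q t ih =>
    intro st v j
    simp only [List.foldl_cons]
    by_cases hqv : q.1 < v
    · rw [if_pos hqv]
      have hstep : (if q.1 < (if v < st.1 then (v, ((i : Int), (j : Int))) else st).1
            then (q.1, ((i : Int), (q.2 : Int)))
            else (if v < st.1 then (v, ((i : Int), (j : Int))) else st))
          = (if q.1 < st.1 then (q.1, ((i : Int), (q.2 : Int))) else st) := by
        split_ifs <;> first | rfl | omega
      rw [hstep]
      exact ih st q.1 q.2
    · rw [if_neg hqv]
      have hstep : (if q.1 < (if v < st.1 then (v, ((i : Int), (j : Int))) else st).1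
            then (q.1, ((i : Int), (q.2 : Int)))
            else (if v < st.1 then (v, ((i : Int), (j : Int))) else st))
          = (if v < st.1 then (v, ((i : Int), (j : Int))) else st) := by
        split_ifs <;> first | rfl | omega
      rw [hstep]
      exact ih st v j

-- A's outer scan over rows = fold of pvMin2 over the per-row table
theorem pv_outer :
    ∀ (rs : List (List Int)) (k : Nat) (st : Int × Int × Int),
    (rs.zipIdx k).foldl (fun st p =>
        (p.1.zipIdx).foldl
          (fun st q => if q.1 < st.1 then (q.1, ((p.2 : Int), (q.2 : Int))) else st) st) st
      = (pvTbl rs k).foldl pvMin2 st := by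
  intro rs
  induction rs with
  | nil => intro k st; simp [pvTbl]
  | cons r rs ih =>
    intro k st
    cases r with
    | nil =>
      simp only [List.zipIdx_cons, List.foldl_cons, List.zipIdx_nil, List.foldl_nil, pvTbl]
      exact ih (k + 1) st
    | cons x t =>
      simp only [List.zipIdx_cons, List.foldl_cons, pvTbl, Nat.zero_add]
      rw [pv_row k (t.zipIdx 1) st x 0]
      exact ih (k + 1) _

-- B's append-building foldl computes pvTbl
theorem pv_build :
    ∀ (rs : List (List Int)) (k : Nat) (acc : List (Int × Int × Int)),
    (rs.zipIdx k).foldl (fun tbl p =>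
        match p.1 with
        | [] => tbl
        | x :: t =>
          let r := pvRowMin x t
          tbl ++ [(r.1, ((p.2 : Int), (r.2 : Int)))]) acc
      = acc ++ pvTbl rs k := by
  intro rs
  induction rs with
  | nil => intro k acc; simp [pvTbl]
  | cons r rs ih =>
    intro k acc
    cases r with
    | nil =>
      simp only [List.zipIdx_cons, List.foldl_cons, pvTbl]
      exact ih (k + 1) acc
    | cons x t =>
      simp only [List.zipIdx_cons, List.foldl_cons, pvTbl]
      rw [ih (k + 1) (acc ++ [((pvRowMin x t).1, ((k : Int), ((pvRowMin x t).2 : Int)))])]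
      simp [pvLift, List.append_assoc]

-- the first table entry absorbs the (x0, 0, 0) seed
theorem pv_seed (x : Int) (t : List Int) :
    pvMin2 (x, ((0 : Int), (0 : Int))) (pvLift 0 (pvRowMin x t)) = pvLift 0 (pvRowMin x t) := by
  rcases pv_rowfold_cases (t.zipIdx 1) x 0 with h | h
  · simp [pvMin2, pvLift, pvRowMin, h]
  · have h' : (pvRowMin x t).1 < x := h
    simp [pvMin2, pvLift, h']

-- ===== VERDICT (by name: the statement is the Claim_ definition above) =====
theorem coordonnees_minimum_spec : Claim_equal_coordonnees_minimum := by
  intro matrice _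
  unfold Spec_coordonnees_minimum coordonnees_minimum coordonnees_minimum_alt
  match matrice with
  | [] => rfl
  | [] :: ms => rfl
  | (x0 :: t0) :: ms =>
    simp only []
    -- bridge A's outer range loop to a zipIdx fold
    rw [pv_range_foldl0
      (f := fun st (ligne : List Int) (i : Nat) =>
        (List.range ligne.length).foldl
          (fun st j => if ligne.getD j 0 < st.1 then (ligne.getD j 0, ((i : Int), (j : Int))) else st) st)
      (d := ([] : List Int))]
    -- bridge each inner range loop to a zipIdx fold
    have hin : (fun (st : Int × Int × Int) (p : List Int × Nat) =>
        (List.range p.1.length).foldl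
          (fun st j => if p.1.getD j 0 < st.1 then (p.1.getD j 0, ((p.2 : Int), (j : Int))) else st) st)
        = (fun st p => (p.1.zipIdx).foldl
            (fun st q => if q.1 < st.1 then (q.1, ((p.2 : Int), (q.2 : Int))) else st) st) := by
      funext st p
      exact pv_range_foldl0
        (f := fun st (x : Int) (j : Nat) => if x < st.1 then (x, ((p.2 : Int), (j : Int))) else st)
        (d := (0 : Int)) p.1 st
    rw [hin, pv_outer ((x0 :: t0) :: ms) 0 (x0, ((0 : Int), (0 : Int))),
        pv_build ((x0 :: t0) :: ms) 0 []]
    simp only [pvTbl, List.nil_append, List.foldl_cons]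
    rw [show (fun (b e : Int × Int × Int) => if e.1 < b.1 then e else b) = pvMin2 from rfl,
        pv_seed x0 t0]
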